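-- pv_equiv track=rewrite | github.com/chiralcentre/Kattis | desiigner.py | solve
-- ===== SOURCE A (Python) =====
-- vowels = {"a","e","i","o","u","y"}
--
-- def solve(word):
--     if len(word) < 4 or word[0] != 'b':
--         return "Neibb"
--     i = 1
--     while i < len(word) and word[i] == "r":
--         i += 1
--     if i < 3:
--         return "Neibb"
--     return "Jebb" if len(word) == i + 1 and word[i] in vowels else "Neibb"
-- ===== SOURCE B (Python) =====
-- vowels = {"a", "e", "i", "o", "u", "y"}
--
-- def solve(word):
--     n = len(word)
--     if n >= 4 and word[-1] in vowels and word == "b" + "r" * (n - 2) + word[-1]: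
--         return "Jebb"
--     return "Neibb"
-- ===== Notes on version B (the rewrite author's own statement) =====
-- stated objective: alternative
-- what changed: Instead of scanning the word with an index loop counting 'r's, B constructs the unique valid word of the same length ending in word's last character ("b" + "r"*(n-2) + last) and compares the whole string against it, plus a vowel test on the last character.
import Mathlib
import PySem

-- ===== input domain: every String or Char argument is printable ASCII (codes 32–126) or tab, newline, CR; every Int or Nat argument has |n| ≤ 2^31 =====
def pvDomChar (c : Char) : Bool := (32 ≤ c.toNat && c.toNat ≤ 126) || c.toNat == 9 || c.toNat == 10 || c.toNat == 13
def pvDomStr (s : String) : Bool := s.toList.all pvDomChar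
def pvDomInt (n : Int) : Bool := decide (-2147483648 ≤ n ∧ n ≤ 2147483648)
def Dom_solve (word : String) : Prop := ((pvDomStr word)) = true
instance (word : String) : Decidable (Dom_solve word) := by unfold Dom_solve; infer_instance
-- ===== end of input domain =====

-- B builds the unique valid word of word's length ending in word's last char
-- ("b" + "r"*(n-2) + last) and compares whole strings, instead of A's index scan;
-- objective: alternative algorithm, not faster.

-- module constant: vowels = {"a","e","i","o","u","y"}
def pyVowels : PySem.Set Char := PySem.Set.ofList ['a', 'e', 'i', 'o', 'u', 'y']

-- ===== PORT A =====
-- while i < len(word) and word[i] == "r": i += 1   (started at i, returns final i)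
def solveLoop (cs : List Char) (i : Nat) : Nat :=
  if h : i < cs.length then
    if cs[i] = 'r' then solveLoop cs (i + 1) else i
  else i
termination_by cs.length - i

def solve (word : String) : String :=
  let cs := word.toList
  if cs.length < 4 ∨ cs[0]? ≠ some 'b' then "Neibb"
  else
    let i := solveLoop cs 1
    if i < 3 then "Neibb"
    else if cs.length = i + 1 ∧ PySem.Set.contains pyVowels (cs.getD i ' ') then "Jebb"
    else "Neibb"

-- ===== PORT B =====
-- word[-1] is getLastD (guarded by n >= 4); "b" + "r"*(n-2) + word[-1] is the cons/append below
def solve_alt (word : String) : String :=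
  let cs := word.toList
  let n := cs.length
  if 4 ≤ n ∧ PySem.Set.contains pyVowels (cs.getLastD ' ') = true ∧
     cs = 'b' :: (List.replicate (n - 2) 'r' ++ [cs.getLastD ' '])
  then "Jebb" else "Neibb"

-- ===== PRECONDITION & SPEC =====
def Spec_solve (word : String) (out : String) : Prop := out = solve_alt word
instance (word : String) (out : String) : Decidable (Spec_solve word out) := by unfold Spec_solve; infer_instance

-- ===== CLAIM (what is proved, stated in full; the proofs are below) =====
def Claim_equal_solve : Prop := ∀ (word : String), Dom_solve word → Spec_solve word (solve word)

-- ===== LEMMAS AND PROOFS =====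

theorem solveLoop_eq (cs : List Char) (i : Nat) :
    solveLoop cs i = i + ((cs.drop i).takeWhile (fun c => c == 'r')).length := by
  by_cases h : i < cs.length
  · by_cases hr : cs[i] = 'r'
    · rw [solveLoop]
      simp only [dif_pos h, if_pos hr]
      rw [solveLoop_eq cs (i + 1), List.drop_eq_getElem_cons h, List.takeWhile_cons]
      simp [hr]
      omega
    · rw [solveLoop]
      simp only [dif_pos h, if_neg hr]
      rw [List.drop_eq_getElem_cons h, List.takeWhile_cons]
      simp [hr]
  · rw [solveLoop]
    simp only [dif_neg h]
    rw [List.drop_eq_nil_of_le (by omega)]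
    simp
termination_by cs.length - i

-- characterization of "t is m r's followed by c" (c ≠ 'r') via A's takeWhile quantities
theorem tail_char (m : Nat) (t : List Char) (c : Char) (hc : c ≠ 'r') :
    t = List.replicate m 'r' ++ [c] ↔
      (t.length = m + 1 ∧ ((t.takeWhile (fun x => x == 'r')).length = m ∧ t.getD m ' ' = c)) := by
  constructor
  · rintro rfl
    refine ⟨by simp, ?_, by simp⟩
    induction m with
    | zero => simp [hc]
    | succ k ih =>
        rw [List.replicate_succ, List.cons_append, List.takeWhile_cons]
        simp [hc]
  · rintro ⟨hlen, htw, hget⟩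
    have hsplit := (List.takeWhile_append_dropWhile (p := fun x => x == 'r') (l := t)).symm
    have htwrep : t.takeWhile (fun x => x == 'r') = List.replicate m 'r' := by
      rw [List.eq_replicate_iff]
      refine ⟨htw, fun x hx => ?_⟩
      have := List.mem_takeWhile_imp hx
      simpa using this
    have hdlen : (t.dropWhile (fun x => x == 'r')).length = 1 := by
      have := congrArg List.length hsplit
      simp only [List.length_append] at this
      omega
    obtain ⟨d, hd⟩ : ∃ d, t.dropWhile (fun x => x == 'r') = [d] := by
      cases hdw : t.dropWhile (fun x => x == 'r') with
      | nil => simp [hdw] at hdlen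
      | cons a l => cases l with
        | nil => exact ⟨a, rfl⟩
        | cons b l' => simp [hdw] at hdlen
    have ht : t = List.replicate m 'r' ++ [d] := by rw [hsplit, htwrep, hd]
    have hdc : d = c := by
      rw [ht] at hget
      simpa using hget
    rw [ht, hdc]

theorem getD_eq_getLastD (t : List Char) (m : Nat) (h : t.length = m + 1) :
    t.getD m ' ' = t.getLastD ' ' := by
  rw [List.getD_eq_getElem?_getD, List.getLastD_eq_getLast?, List.getLast?_eq_getElem?]
  simp [h]

-- ===== VERDICT (by name: the statement is the Claim_ definition above) =====
theorem solve_spec : Claim_equal_solve := by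
  intro word _
  show solve word = solve_alt word
  cases hcs : word.toList with
  | nil => simp [solve, solve_alt, hcs]
  | cons b t =>
      simp only [solve, solve_alt, hcs]
      by_cases hb : b = 'b'
      case neg =>
        rw [if_pos (Or.inr (by simp [hb]))]
        rw [if_neg (fun h => hb (by injection h.2.2))]
      case pos =>
      subst hb
      by_cases hlen : ((('b' :: t) : List Char).length < 4)
      case pos =>
        rw [if_pos (Or.inl hlen), if_neg (fun h => by omega)]
      case neg =>
      have ht3 : 3 ≤ t.length := by simp at hlen; omega
      have htne : t ≠ [] := by intro h0; simp [h0] at ht3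
      rw [if_neg (by push Not; exact ⟨by simpa using hlen, by simp⟩), solveLoop_eq]
      simp only [List.drop_succ_cons, List.drop_zero]
      set k := (t.takeWhile (fun c => c == 'r')).length with hk
      set l := (('b' :: t) : List Char).getLastD ' ' with hl
      have hlt : l = t.getLastD ' ' := by
        rw [hl]; cases t with
        | nil => exact absurd rfl htne
        | cons a s => rfl
      have hAget : (('b' :: t) : List Char).getD (1 + k) ' ' = t.getD k ' ' := by
        rw [Nat.add_comm]; exact List.getD_cons_succ ..
      have hsub : (('b' :: t) : List Char).length - 2 = t.length - 1 := by
        simp only [List.length_cons]; omega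
      -- the central iff between A's acceptance condition and B's
      have main : (¬ (1 + k < 3) ∧ ((('b' :: t) : List Char).length = 1 + k + 1 ∧
            PySem.Set.contains pyVowels ((('b' :: t) : List Char).getD (1 + k) ' ') = true)) ↔
          (4 ≤ (('b' :: t) : List Char).length ∧ PySem.Set.contains pyVowels l = true ∧
            (('b' :: t) : List Char) = 'b' ::
              (List.replicate ((('b' :: t) : List Char).length - 2) 'r' ++ [l])) := by
        constructor
        · rintro ⟨h1, h2, h3⟩
          simp only [List.length_cons] at h2
          have hkk : t.length = k + 1 := by omega
          rw [hAget, getD_eq_getLastD t k hkk, ← hlt] at h3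
          have hlr : l ≠ 'r' := fun h => by
            rw [h] at h3; exact absurd h3 (by decide)
          have hB : t = List.replicate (t.length - 1) 'r' ++ [l] :=
            (tail_char (t.length - 1) t l hlr).mpr
              ⟨by omega, by omega, by
                rw [show t.length - 1 = k by omega, getD_eq_getLastD t k hkk, hlt]⟩
          refine ⟨by simp only [List.length_cons]; omega, h3, ?_⟩
          rw [hsub]
          exact congrArg (List.cons 'b') hB
        · rintro ⟨h4, hvv, heq⟩
          have hlr : l ≠ 'r' := fun h => by
            rw [h] at hvv; exact absurd hvv (by decide)
          rw [hsub] at heq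
          have hB : t = List.replicate (t.length - 1) 'r' ++ [l] := by
            injection heq
          obtain ⟨hlen1, htw1, hget1⟩ := (tail_char (t.length - 1) t l hlr).mp hB
          have hkk : k = t.length - 1 := htw1
          refine ⟨by omega, by simp only [List.length_cons]; omega, ?_⟩
          rw [hAget, hkk, hget1]
          exact hvv
      by_cases hB : (4 ≤ (('b' :: t) : List Char).length ∧
          PySem.Set.contains pyVowels l = true ∧
          (('b' :: t) : List Char) = 'b' ::
            (List.replicate ((('b' :: t) : List Char).length - 2) 'r' ++ [l]))
      case pos =>
        obtain ⟨h1, h2⟩ := main.mpr hB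
        rw [if_pos hB, if_neg h1, if_pos (by exact_mod_cast h2)]
      case neg =>
        rw [if_neg hB]
        by_cases h1 : 1 + k < 3
        · rw [if_pos h1]
        · rw [if_neg h1, if_neg (fun h2 => hB (main.mp ⟨h1, by exact_mod_cast h2⟩))]
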